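-- pv_equiv track=rewrite | github.com/kimwoo123/PS | 프로그래머스/2/17679. ［1차］ 프렌즈4블록/［1차］ 프렌즈4블록.py | solution
-- ===== SOURCE A (Python) =====
-- def is_block(row, col, board):
--     c = board[row][col]
--     for i in range(row, row+2):
--         for j in range(col, col+2):
--             if board[i][j] != c:
--                 return False
--     return True
--
-- def destroy_block(pending, board):
--     count = 0
--     for row, col in pending:
--         for i in range(row, row + 2):
--             for j in range(col, col + 2):
--                 if board[i][j] != None:
--                     count += 1
--                 board[i][j] = None
--     return count
--
-- def find_block(m, n, pending, board):
--     for i in range(m - 1):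
--         for j in range(n - 1):
--             if board[i][j] and is_block(i, j, board):
--                 pending.append((i, j))
--
-- def falling_block(m, n, board):
--     for i in range(n-1, -1, -1):
--         block_list = []
--         for j in range(m-1, -1, -1):
--             if board[j][i] != None:
--                 block_list.append(board[j][i])
--         index = 0
--         for j in range(m-1, -1, -1):
--             if index < len(block_list):
--                 board[j][i] = block_list[index]
--                 index += 1
--             else:
--                 board[j][i] = None
--
-- def solution(m, n, board):
--     answer = 0
--     board = list(map(list, board))
--
--     while True:
--         pending = []
--         find_block(m, n, pending, board)
--         answer += destroy_block(pending, board)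
--         falling_block(m, n, board)
--         if pending == []:
--             break
--
--
--     return answer
-- ===== SOURCE B (Python) =====
-- def solution(m, n, board):
--     # columns as compact stacks (bottom-to-top); gravity is implicit in this representation
--     cols = [[board[i][j] for i in range(m - 1, -1, -1)] for j in range(n)]
--     answer = 0
--     while True:
--         marked = set()
--         for j in range(n - 1):
--             a, b = cols[j], cols[j + 1]
--             for h in range(len(a) - 1):
--                 if h + 1 < len(b) and a[h] == a[h + 1] == b[h] == b[h + 1]:
--                     marked.update({(j, h), (j, h + 1), (j + 1, h), (j + 1, h + 1)})
--         if not marked: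
--             return answer
--         answer += len(marked)
--         cols = [[c for h, c in enumerate(col) if (j, h) not in marked]
--                 for j, col in enumerate(cols)]
-- ===== Notes on version B (the rewrite author's own statement) =====
-- stated objective: alternative
-- what changed: The board is re-represented as n compact column stacks (bottom-to-top lists of surviving chars), so the whole falling_block gravity pass disappears: a round scans adjacent column pairs by height for 2x2 blocks, collects the marked (column,height) cells in a set, and removal is a single per-column filter after which the stacks are already compacted.
import Mathlib
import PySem

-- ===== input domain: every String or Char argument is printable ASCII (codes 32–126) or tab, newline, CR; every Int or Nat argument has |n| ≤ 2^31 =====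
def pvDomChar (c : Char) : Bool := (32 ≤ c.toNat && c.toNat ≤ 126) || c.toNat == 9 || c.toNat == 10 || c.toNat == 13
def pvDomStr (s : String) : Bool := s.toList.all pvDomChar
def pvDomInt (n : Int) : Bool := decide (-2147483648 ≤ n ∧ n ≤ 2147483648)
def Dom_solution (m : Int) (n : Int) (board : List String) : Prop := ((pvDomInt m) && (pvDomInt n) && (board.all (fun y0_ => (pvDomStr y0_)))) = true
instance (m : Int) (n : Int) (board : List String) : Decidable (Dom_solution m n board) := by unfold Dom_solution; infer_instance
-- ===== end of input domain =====

-- B replaces A's grid-of-Nones simulation by compact per-column stacks in which gravity is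
-- implicit (no falling pass at all); equivalence is about the RETURN value (neither Python
-- mutates its arguments: A copies the board, B builds its own column lists).

-- ===== PORT A =====
-- A mutates a board of None-able cells in place: modelled as a grid of Option Char cells
-- (none = destroyed).  Loop indices produced by range() are ≥ 0 here, and pyGetD/pySetD are
-- exact for in-range indices (Pre_ guarantees the shape).
abbrev Grid := List (List (Option Char))

def toGrid (board : List String) : Grid := board.map (fun s => s.toList.map some)

def cellGet (g : Grid) (i j : Int) : Option Char :=
  PySem.List.pyGetD (PySem.List.pyGetD g i []) j none

def cellSet (g : Grid) (i j : Int) (v : Option Char) : Grid :=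
  PySem.List.pySetD g i (PySem.List.pySetD (PySem.List.pyGetD g i []) j v)

-- is_block(row, col, board)
def isBlock (row : Int) (col : Int) (g : Grid) : Bool :=
  let c := cellGet g row col
  (PySem.List.pyRange row (row + 2) 1).all (fun i =>
    (PySem.List.pyRange col (col + 2) 1).all (fun j => cellGet g i j == c))

-- destroy_block(pending, board): returns (count, mutated board)
def destroyBlock (pending : List (Int × Int)) (g : Grid) : Int × Grid :=
  pending.foldl (fun st rc =>
    (PySem.List.pyRange rc.1 (rc.1 + 2) 1).foldl (fun st i =>
      (PySem.List.pyRange rc.2 (rc.2 + 2) 1).foldl (fun (st : Int × Grid) j =>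
        ((if cellGet st.2 i j ≠ none then st.1 + 1 else st.1), cellSet st.2 i j none)) st) st)
    ((0 : Int), g)

-- find_block(m, n, pending, board): returns the pending list it appends to
def findBlock (m : Int) (n : Int) (g : Grid) : List (Int × Int) :=
  (PySem.List.pyRange 0 (m - 1) 1).foldl (fun acc i =>
    (PySem.List.pyRange 0 (n - 1) 1).foldl (fun acc j =>
      if (cellGet g i j).isSome && isBlock i j g then acc ++ [(i, j)] else acc) acc) []

-- falling_block(m, n, board)
def fallingBlock (m : Int) (n : Int) (g : Grid) : Grid :=
  (PySem.List.pyRange (n - 1) (-1) (-1)).foldl (fun g i =>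
    let blockList := (PySem.List.pyRange (m - 1) (-1) (-1)).foldl
      (fun bl j => if cellGet g j i ≠ none then bl ++ [cellGet g j i] else bl)
      ([] : List (Option Char))
    ((PySem.List.pyRange (m - 1) (-1) (-1)).foldl (fun (st : Int × Grid) j =>
      if st.1 < (blockList.length : Int) then
        (st.1 + 1, cellSet st.2 j i (PySem.List.pyGetD blockList st.1 none))
      else
        (st.1, cellSet st.2 j i none)) (0, g)).2) g

-- the while-True loop; fuel m.toNat*n.toNat+1 strictly exceeds the number of iterations the
-- Python performs (each non-final round destroys ≥ 4 of the ≤ m*n region cells)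
def solLoopA (m : Int) (n : Int) : Nat → Int → Grid → Int
  | 0, answer, _ => answer
  | Nat.succ fuel, answer, g =>
    let pending := findBlock m n g
    let d := destroyBlock pending g
    let g2 := fallingBlock m n d.2
    if pending = [] then answer + d.1 else solLoopA m n fuel (answer + d.1) g2

def solution (m : Int) (n : Int) (board : List String) : Int :=
  solLoopA m n (m.toNat * n.toNat + 1) 0 (toGrid board)

-- ===== PORT B =====
-- board[i][j] as a character (Pre_ keeps the indices in range)
def bChar (board : List String) (i j : Int) : Char :=
  PySem.List.pyGetD (PySem.List.pyGetD board i "").toList j ' '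

-- cols = [[board[i][j] for i in range(m-1, -1, -1)] for j in range(n)]
def toCols (m : Int) (n : Int) (board : List String) : List (List Char) :=
  (PySem.List.pyRange 0 n 1).map (fun j =>
    (PySem.List.pyRange (m - 1) (-1) (-1)).map (fun i => bChar board i j))

-- the marked set of one round: scan adjacent column pairs by height
def scanB (n : Int) (cols : List (List Char)) : PySem.Set (Int × Int) :=
  (PySem.List.pyRange 0 (n - 1) 1).foldl (fun s j =>
    let a := PySem.List.pyGetD cols j []
    let b := PySem.List.pyGetD cols (j + 1) []
    (PySem.List.pyRange 0 ((a.length : Int) - 1) 1).foldl (fun s h =>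
      if h + 1 < (b.length : Int) ∧
         PySem.List.pyGetD a h ' ' = PySem.List.pyGetD a (h + 1) ' ' ∧
         PySem.List.pyGetD a (h + 1) ' ' = PySem.List.pyGetD b h ' ' ∧
         PySem.List.pyGetD b h ' ' = PySem.List.pyGetD b (h + 1) ' '
      then PySem.Set.update s [(j, h), (j, h + 1), (j + 1, h), (j + 1, h + 1)]
      else s) s) PySem.Set.empty

-- cols = [[c for h, c in enumerate(col) if (j, h) not in marked] for j, col in enumerate(cols)]
def removeMarked (marked : PySem.Set (Int × Int)) (cols : List (List Char)) : List (List Char) :=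
  (PySem.List.enumerate cols 0).map (fun jc =>
    ((PySem.List.enumerate jc.2 0).filter
      (fun hc => ! PySem.Set.contains marked (jc.1, hc.1))).map (fun hc => hc.2))

def solLoopB (n : Int) : Nat → Int → List (List Char) → Int
  | 0, answer, _ => answer
  | Nat.succ fuel, answer, cols =>
    let marked := scanB n cols
    if marked = [] then answer
    else solLoopB n fuel (answer + (marked.length : Int)) (removeMarked marked cols)

def solution_alt (m : Int) (n : Int) (board : List String) : Int :=
  solLoopB n (m.toNat * n.toNat + 1) 0 (toCols m n board)

-- ===== PRECONDITION & SPEC =====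
-- Pre_ excludes exactly the inputs where Python A raises an IndexError: when both m > 0 and
-- n > 0, the board must have at least m rows whose first m rows each have at least n characters.
def Pre_solution (m : Int) (n : Int) (board : List String) : Prop :=
  m ≤ 0 ∨ n ≤ 0 ∨ (m ≤ (board.length : Int) ∧ ∀ s ∈ board.take m.toNat, n ≤ (s.toList.length : Int))
instance (m : Int) (n : Int) (board : List String) : Decidable (Pre_solution m n board) := by
  unfold Pre_solution; infer_instance

def pvWitness_solution : Int × Int × List String := (2, 2, ["ab", "ab"])

def Spec_solution (m : Int) (n : Int) (board : List String) (out : Int) : Prop := out = solution_alt m n board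
instance (m : Int) (n : Int) (board : List String) (out : Int) : Decidable (Spec_solution m n board out) := by unfold Spec_solution; infer_instance

-- ===== CLAIM (what is proved, stated in full; the proofs are below) =====
def Claim_equal_solution : Prop := ∀ (m : Int) (n : Int) (board : List String), Dom_solution m n board → Pre_solution m n board → Spec_solution m n board (solution m n board)

-- ===== LEMMAS AND PROOFS =====

def getN (g : Grid) (r c : Nat) : Option Char := (g.getD r []).getD c none

lemma cellGet_nn (g : Grid) {i j : Int} (hi : 0 ≤ i) (hj : 0 ≤ j) :
    cellGet g i j = getN g i.toNat j.toNat := by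
  simp [cellGet, getN, PySem.List.pyGetD_of_nonneg _ _ hi, PySem.List.pyGetD_of_nonneg _ _ hj]

lemma cellSet_nn (g : Grid) {i j : Int} (v : Option Char) (hi : 0 ≤ i) (hj : 0 ≤ j) :
    cellSet g i j v = g.set i.toNat ((g.getD i.toNat []).set j.toNat v) := by
  simp [cellSet, PySem.List.pySetD_of_nonneg _ _ hi, PySem.List.pySetD_of_nonneg _ _ hj,
    PySem.List.pyGetD_of_nonneg _ _ hi]

lemma length_cellSet (g : Grid) (i j : Int) (v : Option Char) :
    (cellSet g i j v).length = g.length := PySem.List.length_pySetD _ _ _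

lemma rowlen_cellSet (g : Grid) {i j : Int} (v : Option Char) (hi : 0 ≤ i) (hj : 0 ≤ j) (r : Nat) :
    ((cellSet g i j v).getD r []).length = ((g.getD r []).length) := by
  rw [cellSet_nn g v hi hj]
  simp only [List.getD_eq_getElem?_getD, List.getElem?_set]
  by_cases he : i.toNat = r
  · subst he
    by_cases hr : i.toNat < g.length
    · simp [hr]
    · simp [hr]
  · simp [he]

lemma getN_oor (g : Grid) {r c : Nat} (h : g.length ≤ r ∨ (g.getD r []).length ≤ c) :
    getN g r c = none := by
  rcases h with h | h
  · simp [getN, List.getD_eq_getElem?_getD, List.getElem?_eq_none (by simpa using h)]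
  · simp only [getN, List.getD_eq_getElem?_getD] at h ⊢
    simp [List.getElem?_eq_none (by simpa using h)]

lemma getN_cellSet (g : Grid) {i j : Int} (v : Option Char) (hi : 0 ≤ i) (hj : 0 ≤ j) (r c : Nat) :
    getN (cellSet g i j v) r c =
      if r = i.toNat ∧ c = j.toNat ∧ i.toNat < g.length ∧ j.toNat < (g.getD i.toNat []).length
      then v else getN g r c := by
  rw [cellSet_nn g v hi hj]
  by_cases h2 : i.toNat < g.length
  case neg =>
    rw [List.set_eq_of_length_le (by omega), if_neg (by tauto)]
  case pos =>
    have hrowe : g.getD i.toNat [] = g[i.toNat] := by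
      simp [List.getD_eq_getElem?_getD, List.getElem?_eq_getElem h2]
    by_cases h4 : j.toNat < (g.getD i.toNat []).length
    case neg =>
      rw [hrowe] at h4 ⊢
      rw [show g[i.toNat].set j.toNat v = g[i.toNat] from List.set_eq_of_length_le (by omega),
        List.set_getElem_self h2, if_neg (by tauto)]
    case pos =>
      by_cases h1 : r = i.toNat
      case neg =>
        rw [if_neg (by tauto)]
        simp [getN, List.getD_eq_getElem?_getD, (show i.toNat ≠ r by omega)]
      case pos =>
        subst h1
        by_cases h3 : c = j.toNat
        case neg =>
          rw [if_neg (by tauto)]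
          simp [getN, List.getD_eq_getElem?_getD, h2, (show ¬ j.toNat = c by omega)]
        case pos =>
          subst h3
          rw [if_pos ⟨rfl, rfl, h2, h4⟩]
          rw [hrowe] at h4
          simp [getN, List.getD_eq_getElem?_getD, h2, h4]

lemma cellGet_cellSet (g : Grid) {i j r c : Int} (v : Option Char)
    (hi : 0 ≤ i) (hj : 0 ≤ j) (hr : 0 ≤ r) (hc : 0 ≤ c) :
    cellGet (cellSet g i j v) r c =
      if r = i ∧ c = j ∧ i.toNat < g.length ∧ j.toNat < (g.getD i.toNat []).length
      then v else cellGet g r c := by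
  rw [cellGet_nn _ hr hc, cellGet_nn _ hr hc, getN_cellSet g v hi hj]
  congr 1
  simp only [eq_iff_iff]
  constructor
  · rintro ⟨h1, h2, h3, h4⟩; exact ⟨by omega, by omega, h3, h4⟩
  · rintro ⟨h1, h2, h3, h4⟩; exact ⟨by omega, by omega, h3, h4⟩

lemma cellGet_cellSet_none (g : Grid) {i j r c : Int}
    (hi : 0 ≤ i) (hj : 0 ≤ j) (hr : 0 ≤ r) (hc : 0 ≤ c) :
    cellGet (cellSet g i j none) r c = if r = i ∧ c = j then none else cellGet g r c := by
  rw [cellGet_cellSet g none hi hj hr hc]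
  by_cases h : r = i ∧ c = j
  · obtain ⟨h1, h2⟩ := h
    subst h1; subst h2
    by_cases hin : r.toNat < g.length ∧ c.toNat < (g.getD r.toNat []).length
    · rw [if_pos ⟨rfl, rfl, hin.1, hin.2⟩, if_pos ⟨rfl, rfl⟩]
    · rw [if_neg (by tauto), if_pos ⟨rfl, rfl⟩, cellGet_nn _ hr hc, getN_oor]
      omega
  · rw [if_neg (by tauto), if_neg h]

def sameShape (h g : Grid) : Prop :=
  h.length = g.length ∧ ∀ r : Nat, (h.getD r []).length = (g.getD r []).length

lemma sameShape_refl (g : Grid) : sameShape g g := ⟨rfl, fun _ => rfl⟩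

lemma sameShape_trans {a b c : Grid} (h1 : sameShape a b) (h2 : sameShape b c) : sameShape a c :=
  ⟨h1.1.trans h2.1, fun r => (h1.2 r).trans (h2.2 r)⟩

lemma sameShape_cellSet (g : Grid) {i j : Int} (v : Option Char) (hi : 0 ≤ i) (hj : 0 ≤ j) :
    sameShape (cellSet g i j v) g :=
  ⟨length_cellSet g i j v, rowlen_cellSet g v hi hj⟩

lemma grid_ext {g1 g2 : Grid} (hs : sameShape g1 g2)
    (hc : ∀ r c : Nat, getN g1 r c = getN g2 r c) : g1 = g2 := by
  obtain ⟨hl, hrow⟩ := hs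
  apply List.ext_getElem hl
  intro r h1 h2
  have e1 : List.getD g1 r [] = g1[r] := by
    simp [List.getD_eq_getElem?_getD, List.getElem?_eq_getElem h1]
  have e2 : List.getD g2 r [] = g2[r] := by
    simp [List.getD_eq_getElem?_getD, List.getElem?_eq_getElem h2]
  have hrl : (g1[r]).length = (g2[r]).length := by
    have := hrow r; rwa [e1, e2] at this
  apply List.ext_getElem hrl
  intro c hc1 hc2
  have := hc r c
  rw [getN, getN, e1, e2, List.getD_eq_getElem?_getD, List.getD_eq_getElem?_getD,
    List.getElem?_eq_getElem hc1, List.getElem?_eq_getElem hc2] at this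
  simpa using this

def condB (g : Grid) (p : Int × Int) : Bool :=
  decide (cellGet g p.1 p.2 ≠ none ∧ cellGet g p.1 (p.2 + 1) = cellGet g p.1 p.2 ∧
    cellGet g (p.1 + 1) p.2 = cellGet g p.1 p.2 ∧ cellGet g (p.1 + 1) (p.2 + 1) = cellGet g p.1 p.2)

def cells (p : Int × Int) : List (Int × Int) :=
  [(p.1, p.2), (p.1, p.2 + 1), (p.1 + 1, p.2), (p.1 + 1, p.2 + 1)]

def flatPairs (m n : Int) : List (Int × Int) :=
  (PySem.List.pyRange 0 (m - 1) 1).flatMap (fun i => (PySem.List.pyRange 0 (n - 1) 1).map (fun j => (i, j)))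

def cov (m n : Int) (g : Grid) : List (Int × Int) :=
  ((flatPairs m n).filter (condB g)).flatMap cells

lemma pyRange_two (a : Int) : PySem.List.pyRange a (a + 2) 1 = [a, a + 1] := by
  rw [PySem.List.pyRange_one_cons (by omega), PySem.List.pyRange_one_cons (by omega),
    PySem.List.pyRange_one_eq_nil (by omega)]

lemma cond_eq (g : Grid) (i j : Int) :
    ((cellGet g i j).isSome && isBlock i j g) = condB g (i, j) := by
  unfold isBlock
  rw [pyRange_two, pyRange_two]
  cases h : cellGet g i j <;> simp [condB, h, Bool.beq_eq_decide_eq]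

lemma find_eq (m n : Int) (g : Grid) :
    findBlock m n g = (flatPairs m n).filter (condB g) := by
  unfold findBlock flatPairs
  have inner : ∀ (i : Int) (acc : List (Int × Int)),
      (PySem.List.pyRange 0 (n - 1) 1).foldl (fun acc j =>
        if (cellGet g i j).isSome && isBlock i j g then acc ++ [(i, j)] else acc) acc
      = acc ++ ((PySem.List.pyRange 0 (n - 1) 1).map (fun j => (i, j))).filter (condB g) := by
    intro i acc
    rw [PySem.List.foldl_append_if (fun j => (cellGet g i j).isSome && isBlock i j g) (fun j => (i, j))]
    congr 1
    rw [List.filter_map]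
    apply congrArg
    apply List.filter_congr
    intro j _
    simpa using (cond_eq g i j)
  rw [PySem.List.foldl_congr_mem _ _ (fun acc i => acc ++ ((PySem.List.pyRange 0 (n - 1) 1).map (fun j => (i, j))).filter (condB g)) _ (fun acc i _ => inner i acc)]
  rw [PySem.List.foldl_append_eq_flatMap]
  rw [List.nil_append, ← List.filter_flatMap]

lemma cov_eq (m n : Int) (g : Grid) : cov m n g = (findBlock m n g).flatMap cells := by
  rw [find_eq]; rfl

lemma cells_ne_nil (w : Int × Int) : cells w ≠ [] := by simp [cells]

lemma find_nil_iff (m n : Int) (g : Grid) : findBlock m n g = [] ↔ cov m n g = [] := by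
  rw [cov_eq, List.flatMap_eq_nil_iff]
  constructor
  · intro h; simp [h]
  · intro h
    rcases hf : findBlock m n g with _ | ⟨w, ws⟩
    · rfl
    · exact absurd (h w (by rw [hf]; exact List.mem_cons_self)) (cells_ne_nil w)

lemma mem_cov (m n : Int) (g : Grid) (p : Int × Int) :
    p ∈ cov m n g ↔ ∃ i j : Int, 0 ≤ i ∧ i < m - 1 ∧ 0 ≤ j ∧ j < n - 1 ∧
      condB g (i, j) = true ∧ p ∈ cells (i, j) := by
  rw [cov, List.mem_flatMap]
  constructor
  · rintro ⟨w, hw, hpw⟩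
    rw [List.mem_filter] at hw
    obtain ⟨hwm, hwc⟩ := hw
    rw [flatPairs, List.mem_flatMap] at hwm
    obtain ⟨i, hi, hwmap⟩ := hwm
    rw [List.mem_map] at hwmap
    obtain ⟨j, hj, rfl⟩ := hwmap
    rw [PySem.List.mem_pyRange_one] at hi hj
    exact ⟨i, j, hi.1, hi.2, hj.1, hj.2, hwc, hpw⟩
  · rintro ⟨i, j, hi0, him, hj0, hjn, hcond, hp⟩
    refine ⟨(i, j), ?_, hp⟩
    rw [List.mem_filter]
    refine ⟨?_, hcond⟩
    rw [flatPairs, List.mem_flatMap]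
    exact ⟨i, by rw [PySem.List.mem_pyRange_one]; exact ⟨hi0, him⟩,
      by rw [List.mem_map]; exact ⟨j, by rw [PySem.List.mem_pyRange_one]; exact ⟨hj0, hjn⟩, rfl⟩⟩

lemma cov_spec (m n : Int) (g : Grid) : ∀ p ∈ cov m n g,
    0 ≤ p.1 ∧ p.1 < m ∧ 0 ≤ p.2 ∧ p.2 < n ∧ cellGet g p.1 p.2 ≠ none := by
  intro p hp
  rw [mem_cov] at hp
  obtain ⟨i, j, hi0, him, hj0, hjn, hwc, hpw⟩ := hp
  rw [condB, decide_eq_true_eq] at hwc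
  obtain ⟨h0, h1, h2, h3⟩ := hwc
  simp only [cells, List.mem_cons, List.not_mem_nil, or_false] at hpw
  rcases hpw with rfl | rfl | rfl | rfl
  · exact ⟨by omega, by omega, by omega, by omega, h0⟩
  · exact ⟨by omega, by omega, by omega, by omega, by rw [h1]; exact h0⟩
  · exact ⟨by omega, by omega, by omega, by omega, by rw [h2]; exact h0⟩
  · exact ⟨by omega, by omega, by omega, by omega, by rw [h3]; exact h0⟩

-- invariant linking a partially destroyed grid to the original
def DInv (g : Grid) (X : List (Int × Int)) (h : Grid) : Prop :=
  sameShape h g ∧ ∀ r c : Int, 0 ≤ r → 0 ≤ c →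
    cellGet h r c = if (r, c) ∈ X then none else cellGet g r c

def cellStep (st : Int × Grid) (p : Int × Int) : Int × Grid :=
  ((if cellGet st.2 p.1 p.2 ≠ none then st.1 + 1 else st.1), cellSet st.2 p.1 p.2 none)

def dStep (st : Int × Grid) (rc : Int × Int) : Int × Grid :=
  (PySem.List.pyRange rc.1 (rc.1 + 2) 1).foldl (fun st i =>
    (PySem.List.pyRange rc.2 (rc.2 + 2) 1).foldl (fun (st : Int × Grid) j =>
      ((if cellGet st.2 i j ≠ none then st.1 + 1 else st.1), cellSet st.2 i j none)) st) st

lemma destroyBlock_eq (pending : List (Int × Int)) (g : Grid) :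
    destroyBlock pending g = pending.foldl dStep (0, g) := rfl

lemma dStep_eq (st : Int × Grid) (w : Int × Int) :
    dStep st w = cellStep (cellStep (cellStep (cellStep st (w.1, w.2)) (w.1, w.2 + 1)) (w.1 + 1, w.2)) (w.1 + 1, w.2 + 1) := by
  rw [dStep, pyRange_two, pyRange_two]
  simp [List.foldl_cons, List.foldl_nil, cellStep]

lemma cellStep_spec {g : Grid} {X : List (Int × Int)} {cnt : Int} {h : Grid} {p : Int × Int}
    (hp1 : 0 ≤ p.1) (hp2 : 0 ≤ p.2) (hpn : cellGet g p.1 p.2 ≠ none)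
    (hDInv : DInv g X h) (hcnt : cnt = ((PySem.Set.ofList X).length : Int)) :
    DInv g (X ++ [p]) (cellStep (cnt, h) p).2 ∧
      (cellStep (cnt, h) p).1 = ((PySem.Set.ofList (X ++ [p])).length : Int) := by
  obtain ⟨hs, hcell⟩ := hDInv
  refine ⟨⟨sameShape_trans (sameShape_cellSet h none hp1 hp2) hs, ?_⟩, ?_⟩
  · intro r c hr hc
    rw [cellStep]
    simp only
    rw [cellGet_cellSet_none h hp1 hp2 hr hc, hcell r c hr hc]
    by_cases hrp : r = p.1 ∧ c = p.2
    · have hmem : (r, c) ∈ X ++ [p] := by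
        rw [List.mem_append, List.mem_singleton]
        right
        rw [Prod.ext_iff]
        exact ⟨hrp.1, hrp.2⟩
      rw [if_pos hrp, if_pos hmem]
    · rw [if_neg hrp]
      by_cases hx : (r, c) ∈ X
      · rw [if_pos hx, if_pos (List.mem_append_left _ hx)]
      · rw [if_neg hx, if_neg (by
          rw [List.mem_append]
          rintro (hh | hh)
          · exact hx hh
          · rw [List.mem_singleton] at hh
            exact hrp (by rw [Prod.ext_iff] at hh; simpa using hh))]
  · rw [cellStep]
    simp only
    rw [hcell p.1 p.2 hp1 hp2, PySem.Set.ofList_append_singleton]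
    by_cases hx : (p.1, p.2) ∈ X
    · rw [if_pos hx, if_neg (by simp), hcnt,
        PySem.Set.add_of_mem (by rw [PySem.Set.mem_ofList]; exact hx)]
    · rw [if_neg hx, if_pos hpn, hcnt,
        PySem.Set.add_of_not_mem (by rw [PySem.Set.mem_ofList]; exact hx)]
      simp

lemma cells_flat_append (pre : List (Int × Int)) (w : Int × Int) :
    pre.flatMap cells ++ cells w = (pre ++ [w]).flatMap cells := by
  rw [List.flatMap_append]; simp

lemma dStep_spec {g : Grid} {pre : List (Int × Int)} {cnt : Int} {h : Grid} {w : Int × Int}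
    (hw : ∀ p ∈ cells w, 0 ≤ p.1 ∧ 0 ≤ p.2 ∧ cellGet g p.1 p.2 ≠ none)
    (hInv : DInv g (pre.flatMap cells) h) (hcnt : cnt = ((PySem.Set.ofList (pre.flatMap cells)).length : Int)) :
    DInv g ((pre ++ [w]).flatMap cells) (dStep (cnt, h) w).2 ∧
      (dStep (cnt, h) w).1 = ((PySem.Set.ofList ((pre ++ [w]).flatMap cells)).length : Int) := by
  have h1 := hw (w.1, w.2) (by simp [cells])
  have h2 := hw (w.1, w.2 + 1) (by simp [cells])
  have h3 := hw (w.1 + 1, w.2) (by simp [cells])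
  have h4 := hw (w.1 + 1, w.2 + 1) (by simp [cells])
  rw [dStep_eq]
  have s1 := cellStep_spec (p := (w.1, w.2)) h1.1 h1.2.1 h1.2.2 hInv hcnt
  have s2 := cellStep_spec (p := (w.1, w.2 + 1)) h2.1 h2.2.1 h2.2.2 s1.1 s1.2
  have s3 := cellStep_spec (p := (w.1 + 1, w.2)) h3.1 h3.2.1 h3.2.2 s2.1 s2.2
  have s4 := cellStep_spec (p := (w.1 + 1, w.2 + 1)) h4.1 h4.2.1 h4.2.2 s3.1 s3.2
  have e : pre.flatMap cells ++ [(w.1, w.2)] ++ [(w.1, w.2 + 1)] ++ [(w.1 + 1, w.2)] ++ [(w.1 + 1, w.2 + 1)]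
      = (pre ++ [w]).flatMap cells := by
    rw [← cells_flat_append]
    simp [cells]
  rw [e] at s4
  exact s4

lemma destroy_fold_spec {g : Grid} (ws : List (Int × Int)) (pre : List (Int × Int)) (cnt : Int) (h : Grid)
    (hws : ∀ w ∈ ws, ∀ p ∈ cells w, 0 ≤ p.1 ∧ 0 ≤ p.2 ∧ cellGet g p.1 p.2 ≠ none)
    (hInv : DInv g (pre.flatMap cells) h)
    (hcnt : cnt = ((PySem.Set.ofList (pre.flatMap cells)).length : Int)) :
    DInv g ((pre ++ ws).flatMap cells) (ws.foldl dStep (cnt, h)).2 ∧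
      (ws.foldl dStep (cnt, h)).1 = ((PySem.Set.ofList ((pre ++ ws).flatMap cells)).length : Int) := by
  induction ws generalizing pre cnt h with
  | nil => simpa using ⟨hInv, hcnt⟩
  | cons w ws ih =>
    rw [List.foldl_cons]
    have hstep := dStep_spec (hws w List.mem_cons_self) hInv hcnt
    have := ih (pre ++ [w]) (dStep (cnt, h) w).1 (dStep (cnt, h) w).2
      (fun w' hw' => hws w' (List.mem_cons_of_mem _ hw')) hstep.1 hstep.2
    rw [Prod.mk.eta] at this
    simpa [List.append_assoc] using this

lemma destroyBlock_spec (m n : Int) (g : Grid) :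
    DInv g (cov m n g) (destroyBlock (findBlock m n g) g).2 ∧
      (destroyBlock (findBlock m n g) g).1 = ((PySem.Set.ofList (cov m n g)).length : Int) := by
  have hws : ∀ w ∈ findBlock m n g, ∀ p ∈ cells w, 0 ≤ p.1 ∧ 0 ≤ p.2 ∧ cellGet g p.1 p.2 ≠ none := by
    intro w hw p hp
    have := cov_spec m n g p (by rw [cov_eq, List.mem_flatMap]; exact ⟨w, hw, hp⟩)
    exact ⟨this.1, this.2.2.1, this.2.2.2.2⟩
  have := destroy_fold_spec (g := g) (findBlock m n g) [] 0 g hws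
    (by constructor
        · exact sameShape_refl g
        · intro r c _ _; simp) (by simp [PySem.Set.ofList])
  rw [destroyBlock_eq]
  simpa [← cov_eq] using this

def eraseCells (ds : List (Int × Int)) (g : Grid) : Grid :=
  ds.foldl (fun g p => cellSet g p.1 p.2 none) g

lemma eraseCells_spec (L : List (Int × Int)) (g : Grid)
    (hL : ∀ p ∈ L, 0 ≤ p.1 ∧ 0 ≤ p.2) :
    sameShape (eraseCells L g) g ∧ ∀ r c : Int, 0 ≤ r → 0 ≤ c →
      cellGet (eraseCells L g) r c = if (r, c) ∈ L then none else cellGet g r c := by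
  induction L generalizing g with
  | nil => exact ⟨sameShape_refl g, by simp [eraseCells]⟩
  | cons p L ih =>
    have hp := hL p List.mem_cons_self
    have hstep : eraseCells (p :: L) g = eraseCells L (cellSet g p.1 p.2 none) := rfl
    obtain ⟨ihs, ihc⟩ := ih (cellSet g p.1 p.2 none) (fun q hq => hL q (List.mem_cons_of_mem _ hq))
    constructor
    · rw [hstep]
      exact sameShape_trans ihs (sameShape_cellSet g none hp.1 hp.2)
    · intro r c hr hc
      rw [hstep, ihc r c hr hc, cellGet_cellSet_none g hp.1 hp.2 hr hc]
      by_cases hmem : (r, c) ∈ L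
      · rw [if_pos hmem, if_pos (List.mem_cons_of_mem _ hmem)]
      · rw [if_neg hmem]
        by_cases hrp : r = p.1 ∧ c = p.2
        · rw [if_pos hrp, if_pos (by rw [List.mem_cons]; left; rw [Prod.ext_iff]; exact ⟨hrp.1, hrp.2⟩)]
        · rw [if_neg hrp, if_neg (by
            rw [List.mem_cons]
            rintro (hh | hh)
            · exact hrp (by rw [Prod.ext_iff] at hh; simpa using hh)
            · exact hmem hh)]

lemma sameShape_symm {a b : Grid} (h : sameShape a b) : sameShape b a :=
  ⟨h.1.symm, fun r => (h.2 r).symm⟩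

lemma getN_eq_cellGet (g : Grid) (r c : Nat) : getN g r c = cellGet g (r : Int) (c : Int) := by
  rw [cellGet_nn g (by positivity) (by positivity)]
  simp

-- the two destroyed grids are equal
lemma destroyed_grids_eq (m n : Int) (g : Grid) :
    (destroyBlock (findBlock m n g) g).2 = eraseCells (PySem.Set.ofList (cov m n g)) g := by
  have hA := destroyBlock_spec m n g
  have hE := eraseCells_spec (PySem.Set.ofList (cov m n g)) g
    (fun p hp => by
      have := cov_spec m n g p (by rwa [← PySem.Set.mem_ofList (xs := cov m n g)])
      exact ⟨this.1, this.2.2.1⟩)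
  apply grid_ext (sameShape_trans hA.1.1 (sameShape_symm hE.1))
  intro r c
  rw [getN_eq_cellGet, getN_eq_cellGet,
    hA.1.2 (r : Int) (c : Int) (by positivity) (by positivity),
    hE.2 (r : Int) (c : Int) (by positivity) (by positivity)]
  by_cases hmem : ((r : Int), (c : Int)) ∈ cov m n g
  · rw [if_pos hmem, if_pos (by rwa [PySem.Set.mem_ofList])]
  · rw [if_neg hmem, if_neg (by rwa [PySem.Set.mem_ofList])]

-- ---- A's gravity phase ----
def colList (g : Grid) (m i : Int) : List (Option Char) :=
  (PySem.List.pyRange 0 m 1).map (fun j => cellGet g j i)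

def surv (c : List (Option Char)) : List (Option Char) :=
  c.filter (fun x => decide (x ≠ none))

def specF (g : Grid) (m r i : Int) : Option Char :=
  if r < m - ((surv (colList g m i)).length : Int) then none
  else PySem.List.pyGetD (surv (colList g m i)) (r - (m - ((surv (colList g m i)).length : Int))) none

def Shp (m n : Int) (g : Grid) : Prop :=
  m.toNat ≤ g.length ∧ ∀ r : Nat, r < m.toNat → n.toNat ≤ (g.getD r []).length

lemma Shp_of_sameShape {m n : Int} {g h : Grid} (hs : sameShape h g) (hg : Shp m n g) :
    Shp m n h := ⟨hs.1 ▸ hg.1, fun r hr => (hs.2 r) ▸ hg.2 r hr⟩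

lemma surv_length_le {g : Grid} {m i : Int} (hm : 0 ≤ m) : ((surv (colList g m i)).length : Int) ≤ m := by
  have h1 : (surv (colList g m i)).length ≤ (colList g m i).length := List.length_filter_le _ _
  have h2 : (colList g m i).length = (m - 0).toNat := by
    rw [colList, List.length_map, PySem.List.length_pyRange_one]
  omega

-- in-range fact used for every column write
lemma write_inRange {m n r c : Int} {h : Grid} (hShp : Shp m n h)
    (hr0 : 0 ≤ r) (hrm : r < m) (hc0 : 0 ≤ c) (hcn : c < n) :
    r.toNat < h.length ∧ c.toNat < (h.getD r.toNat []).length := by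
  have h1 := hShp.1
  have h2 := hShp.2 r.toNat (by omega)
  omega

-- the descending write loop of A (counter state k)
lemma writeDesc_spec {m n : Int} (bl : List (Option Char)) (i : Int) (hi0 : 0 ≤ i) (hin : i < n)
    (a : Int) (ham : a < m) (k : Int) (hk : 0 ≤ k) (hkl : k ≤ bl.length) (h : Grid) (hShp : Shp m n h) :
    sameShape ((PySem.List.pyRange a (-1) (-1)).foldl (fun (st : Int × Grid) j =>
        if st.1 < (bl.length : Int) then
          (st.1 + 1, cellSet st.2 j i (PySem.List.pyGetD bl st.1 none))
        else (st.1, cellSet st.2 j i none)) (k, h)).2 h ∧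
    ∀ r c : Int, 0 ≤ r → 0 ≤ c →
      cellGet ((PySem.List.pyRange a (-1) (-1)).foldl (fun (st : Int × Grid) j =>
        if st.1 < (bl.length : Int) then
          (st.1 + 1, cellSet st.2 j i (PySem.List.pyGetD bl st.1 none))
        else (st.1, cellSet st.2 j i none)) (k, h)).2 r c
        = if c = i ∧ r ≤ a then
            (if k + (a - r) < (bl.length : Int) then PySem.List.pyGetD bl (k + (a - r)) none else none)
          else cellGet h r c := by
  by_cases hend : a ≤ -1
  · rw [PySem.List.pyRange_neg_one_eq_nil hend]
    exact ⟨sameShape_refl h, fun r c hr hc => by rw [List.foldl_nil, if_neg (by omega)]⟩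
  · have ha0 : 0 ≤ a := by omega
    rw [PySem.List.pyRange_neg_one_cons (by omega), List.foldl_cons]
    have hreach := write_inRange hShp ha0 ham hi0 hin
    by_cases hklt : k < (bl.length : Int)
    · rw [if_pos hklt]
      have hsh1 : sameShape (cellSet h a i (PySem.List.pyGetD bl k none)) h :=
        sameShape_cellSet h _ ha0 hi0
      have ih := writeDesc_spec bl i hi0 hin (a - 1) (by omega) (k + 1) (by omega) (by omega)
        (cellSet h a i (PySem.List.pyGetD bl k none)) (Shp_of_sameShape hsh1 hShp)
      refine ⟨sameShape_trans ih.1 hsh1, ?_⟩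
      intro r c hr hc
      rw [ih.2 r c hr hc]
      by_cases h1 : c = i ∧ r ≤ a - 1
      · rw [if_pos h1, if_pos (show c = i ∧ r ≤ a from ⟨h1.1, by omega⟩)]
        have e : k + 1 + (a - 1 - r) = k + (a - r) := by omega
        rw [e]
      · rw [if_neg h1, cellGet_cellSet h _ ha0 hi0 hr hc]
        by_cases h2 : r = a ∧ c = i
        · rw [if_pos ⟨h2.1, h2.2, hreach.1, hreach.2⟩,
            if_pos (show c = i ∧ r ≤ a from ⟨h2.2, by omega⟩), h2.1]
          have e : k + (a - a) = k := by omega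
          rw [e, if_pos hklt]
        · rw [if_neg (by tauto)]
          rw [if_neg (fun hcon => by
            rcases hcon with ⟨hc1, hc2⟩
            by_cases hra : r = a
            · exact h2 ⟨hra, hc1⟩
            · exact h1 ⟨hc1, by omega⟩)]
    · rw [if_neg hklt]
      have hsh1 : sameShape (cellSet h a i none) h := sameShape_cellSet h _ ha0 hi0
      have ih := writeDesc_spec bl i hi0 hin (a - 1) (by omega) k hk hkl
        (cellSet h a i none) (Shp_of_sameShape hsh1 hShp)
      refine ⟨sameShape_trans ih.1 hsh1, ?_⟩
      intro r c hr hc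
      rw [ih.2 r c hr hc]
      by_cases h1 : c = i ∧ r ≤ a - 1
      · rw [if_pos h1, if_pos (show c = i ∧ r ≤ a from ⟨h1.1, by omega⟩)]
        rw [if_neg (show ¬ (k + (a - 1 - r) < (bl.length : Int)) by omega),
          if_neg (show ¬ (k + (a - r) < (bl.length : Int)) by omega)]
      · rw [if_neg h1, cellGet_cellSet_none h ha0 hi0 hr hc]
        by_cases h2 : r = a ∧ c = i
        · rw [if_pos h2, if_pos (show c = i ∧ r ≤ a from ⟨h2.2, by omega⟩),
            if_neg (show ¬ (k + (a - r) < (bl.length : Int)) by omega)]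
        · rw [if_neg (by tauto)]
          rw [if_neg (fun hcon => by
            rcases hcon with ⟨hc1, hc2⟩
            by_cases hra : r = a
            · exact h2 ⟨hra, hc1⟩
            · exact h1 ⟨hc1, by omega⟩)]
  termination_by (a + 1).toNat
  decreasing_by all_goals omega

lemma blockList_eq (h : Grid) (m i : Int) :
    (PySem.List.pyRange (m - 1) (-1) (-1)).foldl
      (fun bl j => if cellGet h j i ≠ none then bl ++ [cellGet h j i] else bl)
      ([] : List (Option Char))
    = (surv (colList h m i)).reverse := by
  have hb := PySem.List.foldl_append_if (fun j => decide (cellGet h j i ≠ none))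
    (fun j => cellGet h j i) (PySem.List.pyRange (m - 1) (-1) (-1)) []
  simp only [decide_eq_true_eq] at hb
  rw [hb, List.nil_append]
  have hrev : PySem.List.pyRange (m - 1) (-1) (-1) = (PySem.List.pyRange 0 m 1).reverse := by
    have := PySem.List.pyRange_neg_one_eq_reverse (m - 1) (-1)
    simpa using this
  rw [hrev, List.filter_reverse, List.map_reverse]
  congr 1
  rw [surv, colList, List.filter_map]
  rfl

lemma colList_congr {g h : Grid} {m i : Int}
    (hagree : ∀ r : Int, 0 ≤ r → cellGet h r i = cellGet g r i) :
    colList h m i = colList g m i := by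
  rw [colList, colList]
  apply List.map_congr_left
  intro j hj
  rw [PySem.List.mem_pyRange_one] at hj
  exact hagree j hj.1

-- A's spec value for one written cell, rephrased through the reversed block list
lemma specF_of_desc {h : Grid} {m r i : Int} (hm : 0 ≤ m) (_hr0 : 0 ≤ r) (hrm : r ≤ m - 1) :
    (if 0 + (m - 1 - r) < (((surv (colList h m i)).reverse).length : Int) then
        PySem.List.pyGetD ((surv (colList h m i)).reverse) (0 + (m - 1 - r)) none
      else none)
    = specF h m r i := by
  set s := surv (colList h m i) with hs
  have hlen : ((s.reverse).length : Int) = (s.length : Int) := by rw [List.length_reverse]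
  have hsle : (s.length : Int) ≤ m := surv_length_le hm
  rw [specF, ← hs]
  by_cases hcase : r < m - (s.length : Int)
  · rw [if_neg (by omega), if_pos hcase]
  · rw [if_pos (by omega), if_neg hcase]
    have h1 : (0 : Int) ≤ 0 + (m - 1 - r) := by omega
    have h2 : 0 + (m - 1 - r) < ((s.reverse).length : Int) := by omega
    have h3 : (0 : Int) ≤ r - (m - (s.length : Int)) := by omega
    have h4 : r - (m - (s.length : Int)) < (s.length : Int) := by omega
    rw [PySem.List.pyGetD_eq_getElem _ none h1 h2, PySem.List.pyGetD_eq_getElem _ none h3 h4,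
      List.getElem_reverse]
    congr 1
    omega

def fallStepA (m : Int) (g : Grid) (i : Int) : Grid :=
  let blockList := (PySem.List.pyRange (m - 1) (-1) (-1)).foldl
    (fun bl j => if cellGet g j i ≠ none then bl ++ [cellGet g j i] else bl)
    ([] : List (Option Char))
  ((PySem.List.pyRange (m - 1) (-1) (-1)).foldl (fun (st : Int × Grid) j =>
    if st.1 < (blockList.length : Int) then
      (st.1 + 1, cellSet st.2 j i (PySem.List.pyGetD blockList st.1 none))
    else (st.1, cellSet st.2 j i none)) (0, g)).2

lemma fallingBlock_eq (m n : Int) (g : Grid) :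
    fallingBlock m n g = (PySem.List.pyRange (n - 1) (-1) (-1)).foldl (fallStepA m) g := rfl

lemma fallStepA_spec {m n : Int} (i : Int) (hi0 : 0 ≤ i) (hin : i < n) (h : Grid)
    (hShp : Shp m n h) :
    sameShape (fallStepA m h i) h ∧ ∀ r c : Int, 0 ≤ r → 0 ≤ c →
      cellGet (fallStepA m h i) r c = if c = i ∧ r < m then specF h m r i else cellGet h r c := by
  by_cases hm : 0 ≤ m
  · have hbody : fallStepA m h i = ((PySem.List.pyRange (m - 1) (-1) (-1)).foldl
        (fun (st : Int × Grid) j =>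
          if st.1 < (((surv (colList h m i)).reverse).length : Int) then
            (st.1 + 1, cellSet st.2 j i (PySem.List.pyGetD ((surv (colList h m i)).reverse) st.1 none))
          else (st.1, cellSet st.2 j i none)) (0, h)).2 := by
      simp only [fallStepA, blockList_eq]
    have hw := writeDesc_spec (m := m) (n := n) ((surv (colList h m i)).reverse) i hi0 hin
      (m - 1) (by omega) 0 le_rfl (by positivity) h hShp
    rw [hbody]
    refine ⟨hw.1, ?_⟩
    intro r c hr hc
    rw [hw.2 r c hr hc]
    by_cases h1 : c = i ∧ r < m
    · rw [if_pos ⟨h1.1, by omega⟩, if_pos h1, specF_of_desc hm hr (by omega)]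
    · rw [if_neg (fun hcon => h1 ⟨hcon.1, by omega⟩), if_neg h1]
  · have hnil : PySem.List.pyRange (m - 1) (-1) (-1) = [] :=
      PySem.List.pyRange_neg_one_eq_nil (by omega)
    have hbody : fallStepA m h i = h := by
      simp only [fallStepA, hnil, List.foldl_nil]
    rw [hbody]
    exact ⟨sameShape_refl h, fun r c hr hc => by rw [if_neg (by omega)]⟩

lemma fallA_cols {m n : Int} {g : Grid} (hShpG : Shp m n g) (a : Int) (han : a < n) (h : Grid)
    (hsh : sameShape h g)
    (hagree : ∀ r c : Int, 0 ≤ r → 0 ≤ c → c ≤ a → cellGet h r c = cellGet g r c) :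
    sameShape ((PySem.List.pyRange a (-1) (-1)).foldl (fallStepA m) h) g ∧
    ∀ r c : Int, 0 ≤ r → 0 ≤ c →
      cellGet ((PySem.List.pyRange a (-1) (-1)).foldl (fallStepA m) h) r c
        = if c ≤ a ∧ r < m then specF g m r c else cellGet h r c := by
  by_cases hend : a ≤ -1
  · rw [PySem.List.pyRange_neg_one_eq_nil hend]
    exact ⟨hsh, fun r c hr hc => by rw [List.foldl_nil, if_neg (by omega)]⟩
  · have ha0 : 0 ≤ a := by omega
    rw [PySem.List.pyRange_neg_one_cons (by omega), List.foldl_cons]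
    have hstep := fallStepA_spec a ha0 han h (Shp_of_sameShape hsh hShpG)
    have hag_col : colList h m a = colList g m a :=
      colList_congr (fun r hr => hagree r a hr ha0 le_rfl)
    have hsh1 : sameShape (fallStepA m h a) g := sameShape_trans hstep.1 hsh
    have hagree1 : ∀ r c : Int, 0 ≤ r → 0 ≤ c → c ≤ a - 1 →
        cellGet (fallStepA m h a) r c = cellGet g r c := by
      intro r c hr hc hca
      rw [hstep.2 r c hr hc, if_neg (by omega)]
      exact hagree r c hr hc (by omega)
    have ih := fallA_cols hShpG (a - 1) (by omega) (fallStepA m h a) hsh1 hagree1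
    refine ⟨ih.1, ?_⟩
    intro r c hr hc
    rw [ih.2 r c hr hc]
    by_cases h1 : c ≤ a - 1 ∧ r < m
    · rw [if_pos h1, if_pos ⟨by omega, h1.2⟩]
    · rw [if_neg h1, hstep.2 r c hr hc]
      by_cases h2 : c = a ∧ r < m
      · rw [if_pos h2, if_pos ⟨by omega, h2.2⟩, specF, specF, hag_col, h2.1]
      · rw [if_neg h2, if_neg (by omega)]
  termination_by (a + 1).toNat
  decreasing_by omega

lemma ofList_ne_nil {xs : List (Int × Int)} (h : xs ≠ []) : PySem.Set.ofList xs ≠ [] := by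
  rcases xs with _ | ⟨p, t⟩
  · exact absurd rfl h
  · exact List.ne_nil_of_mem ((PySem.Set.mem_ofList _ _).mpr List.mem_cons_self)

lemma fall_sameShape {m n : Int} (g : Grid) (hShp : Shp m n g) :
    sameShape (fallingBlock m n g) g := by
  rw [fallingBlock_eq]
  exact (fallA_cols hShp (n - 1) (by omega) g (sameShape_refl g) (fun _ _ _ _ _ => rfl)).1

lemma find_degenerate {m n : Int} (g : Grid) (hd : m ≤ 1 ∨ n ≤ 1) : findBlock m n g = [] := by
  rw [find_eq]
  have : flatPairs m n = [] := by
    rcases hd with hd | hd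
    · rw [flatPairs, PySem.List.pyRange_one_eq_nil (b := m - 1) (by omega), List.flatMap_nil]
    · rw [flatPairs, PySem.List.pyRange_one_eq_nil (b := n - 1) (by omega)]
      simp
  rw [this, List.filter_nil]

lemma loopA_degenerate {m n : Int} (fuel : Nat) (ans : Int) (g : Grid) (hd : m ≤ 1 ∨ n ≤ 1) :
    solLoopA m n (fuel + 1) ans g = ans := by
  simp only [solLoopA, find_degenerate g hd]
  simp [destroyBlock]

-- ---- B-side: compact column stacks ----
def colAt (cols : List (List Char)) (c : Int) : List Char := cols.getD c.toNat []

-- what a settled grid cell holds in terms of a bottom-to-top column stack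
def hCell (m : Int) (col : List Char) (r : Int) : Option Char :=
  if m - 1 - r < (col.length : Int) then some (col.getD (m - 1 - r).toNat ' ') else none

-- simulation relation between A's grid and B's column stacks
def ColInv (m n : Int) (g : Grid) (cols : List (List Char)) : Prop :=
  Shp m n g ∧ cols.length = n.toNat ∧
  ∀ c : Int, 0 ≤ c → c < n →
    (colAt cols c).length ≤ m.toNat ∧
    ∀ r : Int, 0 ≤ r → r < m → cellGet g r c = hCell m (colAt cols c) r

def bcells (j h : Int) : List (Int × Int) := [(j, h), (j, h + 1), (j + 1, h), (j + 1, h + 1)]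

-- the window condition B tests, as written in the port
def BCraw (cols : List (List Char)) (j h : Int) : Prop :=
  h + 1 < ((PySem.List.pyGetD cols (j + 1) []).length : Int) ∧
  PySem.List.pyGetD (PySem.List.pyGetD cols j []) h ' ' = PySem.List.pyGetD (PySem.List.pyGetD cols j []) (h + 1) ' ' ∧
  PySem.List.pyGetD (PySem.List.pyGetD cols j []) (h + 1) ' ' = PySem.List.pyGetD (PySem.List.pyGetD cols (j + 1) []) h ' ' ∧
  PySem.List.pyGetD (PySem.List.pyGetD cols (j + 1) []) h ' ' = PySem.List.pyGetD (PySem.List.pyGetD cols (j + 1) []) (h + 1) ' '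

lemma getD_eq_getElem' {α : Type} (l : List α) (d : α) {k : Nat} (h : k < l.length) :
    l.getD k d = l[k] := by
  simp [List.getD_eq_getElem?_getD, List.getElem?_eq_getElem h]

lemma pyGetD_nn {α : Type} (l : List α) (d : α) {i : Int} (h0 : 0 ≤ i) :
    PySem.List.pyGetD l i d = l.getD i.toNat d := by
  have := PySem.List.pyGetD_natCast l i.toNat d
  rwa [show ((i.toNat : Nat) : Int) = i by omega] at this

lemma pyGetD_colAt (cols : List (List Char)) {j : Int} (hj0 : 0 ≤ j) :
    PySem.List.pyGetD cols j [] = colAt cols j := by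
  rw [pyGetD_nn _ _ hj0, colAt]

-- generic membership of a fold that only grows the state
lemma mem_foldl_of_step {α β : Type} (l : List α) (F : List β → α → List β) (P : α → β → Prop)
    (hF : ∀ s a y, y ∈ F s a ↔ y ∈ s ∨ P a y) (s : List β) (y : β) :
    y ∈ l.foldl F s ↔ y ∈ s ∨ ∃ a ∈ l, P a y := by
  induction l generalizing s with
  | nil => simp
  | cons a l ih =>
    rw [List.foldl_cons, ih, hF]
    simp only [List.mem_cons]
    constructor
    · rintro ((h | h) | ⟨b, hb, h⟩)
      · exact Or.inl h
      · exact Or.inr ⟨a, Or.inl rfl, h⟩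
      · exact Or.inr ⟨b, Or.inr hb, h⟩
    · rintro (h | ⟨b, (rfl | hb), h⟩)
      · exact Or.inl (Or.inl h)
      · exact Or.inl (Or.inr h)
      · exact Or.inr ⟨b, hb, h⟩

lemma nodup_foldl_of_step {α β : Type} (l : List α) (F : List β → α → List β)
    (hF : ∀ s a, s.Nodup → (F s a).Nodup) (s : List β) (hs : s.Nodup) :
    (l.foldl F s).Nodup := by
  induction l generalizing s with
  | nil => exact hs
  | cons a l ih => exact ih _ (hF s a hs)

def scanStep (cols : List (List Char)) (j : Int) (s : PySem.Set (Int × Int)) (h : Int) :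
    PySem.Set (Int × Int) :=
  if h + 1 < ((PySem.List.pyGetD cols (j + 1) []).length : Int) ∧
     PySem.List.pyGetD (PySem.List.pyGetD cols j []) h ' ' = PySem.List.pyGetD (PySem.List.pyGetD cols j []) (h + 1) ' ' ∧
     PySem.List.pyGetD (PySem.List.pyGetD cols j []) (h + 1) ' ' = PySem.List.pyGetD (PySem.List.pyGetD cols (j + 1) []) h ' ' ∧
     PySem.List.pyGetD (PySem.List.pyGetD cols (j + 1) []) h ' ' = PySem.List.pyGetD (PySem.List.pyGetD cols (j + 1) []) (h + 1) ' '
  then PySem.Set.update s [(j, h), (j, h + 1), (j + 1, h), (j + 1, h + 1)]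
  else s

lemma scanB_eq (n : Int) (cols : List (List Char)) :
    scanB n cols = (PySem.List.pyRange 0 (n - 1) 1).foldl (fun s j =>
      (PySem.List.pyRange 0 (((PySem.List.pyGetD cols j []).length : Int) - 1) 1).foldl
        (scanStep cols j) s) PySem.Set.empty := rfl

lemma mem_scanStep (cols : List (List Char)) (j : Int) (s : PySem.Set (Int × Int)) (h : Int)
    (y : Int × Int) :
    y ∈ scanStep cols j s h ↔ y ∈ s ∨ (BCraw cols j h ∧ y ∈ bcells j h) := by
  unfold scanStep
  split_ifs with hc
  · rw [PySem.Set.mem_update]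
    exact ⟨fun hh => hh.elim Or.inl (fun hy => Or.inr ⟨hc, hy⟩),
      fun hh => hh.elim Or.inl (fun hy => Or.inr hy.2)⟩
  · exact ⟨Or.inl, fun hh => hh.elim id (fun hy => absurd hy.1 hc)⟩

lemma mem_scanB (n : Int) (cols : List (List Char)) (p : Int × Int) :
    p ∈ scanB n cols ↔ ∃ j h : Int, 0 ≤ j ∧ j < n - 1 ∧ 0 ≤ h ∧
      h < ((PySem.List.pyGetD cols j []).length : Int) - 1 ∧ BCraw cols j h ∧ p ∈ bcells j h := by
  rw [scanB_eq]
  rw [mem_foldl_of_step _ _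
    (fun j y => ∃ h ∈ PySem.List.pyRange 0 (((PySem.List.pyGetD cols j []).length : Int) - 1) 1,
      BCraw cols j h ∧ y ∈ bcells j h)
    (by
      intro s j y
      rw [mem_foldl_of_step _ _ (fun h y => BCraw cols j h ∧ y ∈ bcells j h)
        (fun s h y => mem_scanStep cols j s h y)])]
  constructor
  · rintro (h | ⟨j, hj, h, hh, hb, hp⟩)
    · exact absurd h (by simp [PySem.Set.empty])
    · rw [PySem.List.mem_pyRange_one] at hj hh
      exact ⟨j, h, hj.1, hj.2, hh.1, hh.2, hb, hp⟩
  · rintro ⟨j, h, hj0, hjn, hh0, hhl, hb, hp⟩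
    exact Or.inr ⟨j, by rw [PySem.List.mem_pyRange_one]; exact ⟨hj0, hjn⟩,
      h, by rw [PySem.List.mem_pyRange_one]; exact ⟨hh0, hhl⟩, hb, hp⟩

lemma nodup_scanB (n : Int) (cols : List (List Char)) : (scanB n cols).Nodup := by
  rw [scanB_eq]
  apply nodup_foldl_of_step
  · intro s j hs
    apply nodup_foldl_of_step _ _ _ _ hs
    intro s h hs'
    unfold scanStep
    split_ifs with hc
    · exact PySem.Set.nodup_update _ _ hs'
    · exact hs'
  · exact List.nodup_nil

-- block condition correspondence under the simulation relation
lemma corr_cond {m n : Int} {g : Grid} {cols : List (List Char)} (hInv : ColInv m n g cols)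
    {i j : Int} (hi0 : 0 ≤ i) (him : i < m - 1) (hj0 : 0 ≤ j) (hjn : j < n - 1) :
    condB g (i, j) = true ↔
      ((m - 2 - i) + 1 < ((colAt cols j).length : Int) ∧ BCraw cols j (m - 2 - i)) := by
  obtain ⟨hShp, hlen, hcol⟩ := hInv
  have hE00 : cellGet g i j = (if (m - 2 - i) + 1 < ((colAt cols j).length : Int) then some ((colAt cols j).getD ((m - 2 - i) + 1).toNat ' ') else none) := by
    rw [(hcol j hj0 (by omega)).2 i hi0 (by omega), hCell,
      show m - 1 - i = (m - 2 - i) + 1 by omega]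
  have hE01 : cellGet g i (j + 1) = (if (m - 2 - i) + 1 < ((colAt cols (j + 1)).length : Int) then some ((colAt cols (j + 1)).getD ((m - 2 - i) + 1).toNat ' ') else none) := by
    rw [(hcol (j + 1) (by omega) (by omega)).2 i hi0 (by omega), hCell,
      show m - 1 - i = (m - 2 - i) + 1 by omega]
  have hE10 : cellGet g (i + 1) j = (if (m - 2 - i) < ((colAt cols j).length : Int) then some ((colAt cols j).getD (m - 2 - i).toNat ' ') else none) := by
    rw [(hcol j hj0 (by omega)).2 (i + 1) (by omega) (by omega), hCell,
      show m - 1 - (i + 1) = m - 2 - i by omega]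
  have hE11 : cellGet g (i + 1) (j + 1) = (if (m - 2 - i) < ((colAt cols (j + 1)).length : Int) then some ((colAt cols (j + 1)).getD (m - 2 - i).toNat ' ') else none) := by
    rw [(hcol (j + 1) (by omega) (by omega)).2 (i + 1) (by omega) (by omega), hCell,
      show m - 1 - (i + 1) = m - 2 - i by omega]
  rw [condB, decide_eq_true_eq, hE00, hE01, hE10, hE11]
  unfold BCraw
  rw [pyGetD_colAt cols hj0, pyGetD_colAt cols (show (0:Int) ≤ j + 1 by omega),
    pyGetD_nn _ ' ' (show (0:Int) ≤ m - 2 - i by omega),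
    pyGetD_nn _ ' ' (show (0:Int) ≤ (m - 2 - i) + 1 by omega),
    pyGetD_nn _ ' ' (show (0:Int) ≤ m - 2 - i by omega),
    pyGetD_nn _ ' ' (show (0:Int) ≤ (m - 2 - i) + 1 by omega)]
  constructor
  · rintro ⟨hX, hY, hZ, hW⟩
    have hA : (m - 2 - i) + 1 < ((colAt cols j).length : Int) := by
      by_contra hcon
      rw [if_neg hcon] at hX
      exact hX rfl
    rw [if_pos hA] at hX hY hZ hW
    have hB : (m - 2 - i) + 1 < ((colAt cols (j + 1)).length : Int) := by
      by_contra hcon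
      rw [if_neg hcon] at hY
      exact absurd hY (by simp)
    rw [if_pos hB] at hY
    rw [if_pos (show (m - 2 - i) < ((colAt cols j).length : Int) by omega)] at hZ
    have hB2 : (m - 2 - i) < ((colAt cols (j + 1)).length : Int) := by
      by_contra hcon
      rw [if_neg hcon] at hW
      exact absurd hW (by simp)
    rw [if_pos hB2] at hW
    rw [Option.some.injEq] at hY hZ hW
    exact ⟨hA, hB, by rw [hZ], by rw [hW], by rw [hW, hY]⟩
  · rintro ⟨hA, hB, e1, e2, e3⟩
    rw [if_pos hA, if_pos hB, if_pos (show (m - 2 - i) < ((colAt cols j).length : Int) by omega),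
      if_pos (show (m - 2 - i) < ((colAt cols (j + 1)).length : Int) by omega)]
    refine ⟨by simp, ?_, ?_, ?_⟩
    · rw [Option.some.injEq, ← e3, ← e2]
    · rw [Option.some.injEq, e1]
    · rw [Option.some.injEq, ← e2]

-- cell-level correspondence: a grid cell is destroyed iff its (column, height) image is marked
lemma mem_corr {m n : Int} {g : Grid} {cols : List (List Char)} (hInv : ColInv m n g cols)
    (r c : Int) :
    (r, c) ∈ PySem.Set.ofList (cov m n g) ↔ (c, m - 1 - r) ∈ scanB n cols := by
  rw [PySem.Set.mem_ofList, mem_cov, mem_scanB]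
  constructor
  · rintro ⟨i, j, hi0, him, hj0, hjn, hcond, hp⟩
    rw [corr_cond hInv hi0 him hj0 hjn] at hcond
    obtain ⟨hA, hbc⟩ := hcond
    refine ⟨j, m - 2 - i, hj0, hjn, by omega, ?_, hbc, ?_⟩
    · rw [pyGetD_colAt cols hj0]; omega
    · simp only [cells, List.mem_cons, List.not_mem_nil, or_false, Prod.mk.injEq] at hp
      simp only [bcells, List.mem_cons, List.not_mem_nil, or_false, Prod.mk.injEq]
      omega
  · rintro ⟨j, h, hj0, hjn, hh0, hhl, hbc, hp⟩
    rw [pyGetD_colAt cols hj0] at hhl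
    have hLa : (colAt cols j).length ≤ m.toNat := (hInv.2.2 j hj0 (by omega)).1
    have hm2 : 2 ≤ m := by omega
    have hi0 : 0 ≤ m - 2 - h := by omega
    refine ⟨m - 2 - h, j, hi0, by omega, hj0, hjn, ?_, ?_⟩
    · rw [corr_cond hInv hi0 (by omega) hj0 hjn, show m - 2 - (m - 2 - h) = h by omega]
      exact ⟨by omega, hbc⟩
    · simp only [bcells, List.mem_cons, List.not_mem_nil, or_false, Prod.mk.injEq] at hp
      simp only [cells, List.mem_cons, List.not_mem_nil, or_false, Prod.mk.injEq]
      omega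

lemma scan_perm {m n : Int} {g : Grid} {cols : List (List Char)} (hInv : ColInv m n g cols) :
    ((PySem.Set.ofList (cov m n g)).map (fun p => (p.2, m - 1 - p.1))).Perm (scanB n cols) := by
  have hnodS : ((PySem.Set.ofList (cov m n g)).map (fun p => (p.2, m - 1 - p.1))).Nodup := by
    apply (PySem.Set.nodup_ofList _).map
    intro p q hpq
    rw [Prod.mk.injEq] at hpq
    obtain ⟨e1, e2⟩ := hpq
    exact Prod.ext (by omega) e1
  rw [List.perm_ext_iff_of_nodup hnodS (nodup_scanB n cols)]
  intro q
  rw [List.mem_map]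
  constructor
  · rintro ⟨p, hp, rfl⟩
    exact (mem_corr hInv p.1 p.2).mp (by simpa using hp)
  · intro hq
    refine ⟨(m - 1 - q.2, q.1), ?_, by simp⟩
    have := (mem_corr hInv (m - 1 - q.2) q.1).mpr
    rw [show m - 1 - (m - 1 - q.2) = q.2 by omega] at this
    exact this (by simpa using hq)

lemma scan_len {m n : Int} {g : Grid} {cols : List (List Char)} (hInv : ColInv m n g cols) :
    ((PySem.Set.ofList (cov m n g)).length : Int) = ((scanB n cols).length : Int) := by
  have := (scan_perm hInv).length_eq
  rw [List.length_map] at this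
  exact_mod_cast this

lemma scan_nil_iff {m n : Int} {g : Grid} {cols : List (List Char)} (hInv : ColInv m n g cols) :
    findBlock m n g = [] ↔ scanB n cols = [] := by
  rw [find_nil_iff]
  constructor
  · intro h
    have := (scan_perm hInv).symm.length_eq
    rw [h] at this
    simp only [PySem.Set.ofList, List.foldl_nil] at this
    simpa using List.eq_nil_of_length_eq_zero (by simpa using this)
  · intro h
    by_contra hcov
    have := (scan_perm hInv).length_eq
    rw [h] at this
    simp only [List.length_nil, List.length_map] at this
    exact ofList_ne_nil hcov (List.eq_nil_of_length_eq_zero this)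

-- the new stack of column c after a round of B
def newcolOf (marked : PySem.Set (Int × Int)) (cols : List (List Char)) (c : Int) : List Char :=
  ((PySem.List.enumerate (colAt cols c) 0).filter
    (fun hc => ! PySem.Set.contains marked (c, hc.1))).map (fun hc => hc.2)

lemma removeMarked_getD (marked : PySem.Set (Int × Int)) (cols : List (List Char)) {c : Int}
    (hc0 : 0 ≤ c) (hlt : c.toNat < cols.length) :
    colAt (removeMarked marked cols) c = newcolOf marked cols c := by
  unfold removeMarked newcolOf colAt
  rw [getD_eq_getElem' _ _ (by rw [List.length_map, PySem.List.length_enumerate]; exact hlt),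
    List.getElem_map, PySem.List.getElem_enumerate]
  rw [getD_eq_getElem' _ _ hlt]
  simp only [show ((0 : Int) + (c.toNat : Int)) = c from by omega]

lemma newcol_len (marked : PySem.Set (Int × Int)) (cols : List (List Char)) (c : Int) :
    (newcolOf marked cols c).length ≤ (colAt cols c).length := by
  unfold newcolOf
  calc _ = _ := List.length_map ..
    _ ≤ (PySem.List.enumerate (colAt cols c) 0).length := List.length_filter_le _ _
    _ = _ := PySem.List.length_enumerate _ _

-- change of variable between descending heights and ascending rows
lemma map_sub_pyRange_neg (t a b : Int) :
    (PySem.List.pyRange a b (-1)).map (fun h => t - h) = PySem.List.pyRange (t - a) (t - b) 1 := by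
  rw [PySem.List.pyRange_neg_one, PySem.List.pyRange_one, List.map_map]
  rw [show ((t - b) - (t - a)) = a - b by ring]
  apply List.map_congr_left
  intro k _
  simp only [Function.comp_apply]
  ring

lemma surv_erase_eq {m n : Int} {g : Grid} {cols : List (List Char)} (hInv : ColInv m n g cols)
    {c : Int} (hc0 : 0 ≤ c) (hcn : c < n) (hm : 0 ≤ m) :
    surv (colList (eraseCells (PySem.Set.ofList (cov m n g)) g) m c)
      = ((newcolOf (scanB n cols) cols c).reverse).map some := by
  have hE := eraseCells_spec (PySem.Set.ofList (cov m n g)) g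
    (fun p hp => by
      have := cov_spec m n g p (by rwa [← PySem.Set.mem_ofList (xs := cov m n g)])
      exact ⟨this.1, this.2.2.1⟩)
  have hLm : ((colAt cols c).length : Int) ≤ m := by
    have := (hInv.2.2 c hc0 hcn).1
    omega
  -- 1. each surviving-column cell of the erased grid, by height
  have hcl : colList (eraseCells (PySem.Set.ofList (cov m n g)) g) m c
      = (PySem.List.pyRange 0 m 1).map (fun r =>
          if PySem.Set.contains (scanB n cols) (c, m - 1 - r) = true then none
          else hCell m (colAt cols c) r) := by
    rw [colList]
    apply List.map_congr_left
    intro r hr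
    rw [PySem.List.mem_pyRange_one] at hr
    rw [hE.2 r c hr.1 hc0, (hInv.2.2 c hc0 hcn).2 r hr.1 hr.2]
    by_cases hmem : (r, c) ∈ PySem.Set.ofList (cov m n g)
    · rw [if_pos hmem,
        if_pos (by rw [PySem.Set.contains_iff]; exact (mem_corr hInv r c).mp hmem)]
    · rw [if_neg hmem, if_neg (by
        rw [PySem.Set.contains_iff]
        intro hmk
        exact hmem ((mem_corr hInv r c).mpr hmk))]
  rw [surv, hcl,
    PySem.List.pyRange_one_append 0 (m - ((colAt cols c).length : Int)) m (by omega) (by omega),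
    List.map_append, List.filter_append]
  -- 2. cells below the stack bottom are all empty
  have hnil : ((PySem.List.pyRange 0 (m - ((colAt cols c).length : Int)) 1).map (fun r =>
      if PySem.Set.contains (scanB n cols) (c, m - 1 - r) = true then none
      else hCell m (colAt cols c) r)).filter (fun x => decide (x ≠ none)) = [] := by
    rw [List.filter_eq_nil_iff]
    intro x hx
    rw [List.mem_map] at hx
    obtain ⟨r, hr, rfl⟩ := hx
    rw [PySem.List.mem_pyRange_one] at hr
    by_cases hmk : PySem.Set.contains (scanB n cols) (c, m - 1 - r) = true
    · rw [if_pos hmk]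
      simp
    · rw [if_neg hmk, hCell, if_neg (show ¬ (m - 1 - r < ((colAt cols c).length : Int)) by omega)]
      simp
  rw [hnil, List.nil_append]
  -- 3. both sides as a descending filter-map over heights
  rw [show PySem.List.pyRange (m - ((colAt cols c).length : Int)) m 1
      = (PySem.List.pyRange (((colAt cols c).length : Int) - 1) (-1) (-1)).map (fun h => (m - 1) - h) by
    rw [map_sub_pyRange_neg]
    congr 1 <;> ring]
  rw [List.map_map]
  have hmapc : (PySem.List.pyRange (((colAt cols c).length : Int) - 1) (-1) (-1)).map
        ((fun r => if PySem.Set.contains (scanB n cols) (c, m - 1 - r) = true then none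
          else hCell m (colAt cols c) r) ∘ (fun h => (m - 1) - h))
      = (PySem.List.pyRange (((colAt cols c).length : Int) - 1) (-1) (-1)).map (fun h =>
          if PySem.Set.contains (scanB n cols) (c, h) = true then none
          else some ((colAt cols c).getD h.toNat ' ')) := by
    apply List.map_congr_left
    intro h hh
    rw [PySem.List.mem_pyRange_neg_one] at hh
    simp only [Function.comp_apply]
    rw [show m - 1 - (m - 1 - h) = h by omega, hCell,
      if_pos (show m - 1 - (m - 1 - h) < ((colAt cols c).length : Int) by omega),
      show m - 1 - (m - 1 - h) = h by omega]
  rw [hmapc, List.filter_map]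
  have hrev : (PySem.List.pyRange 0 (((colAt cols c).length : Int)) 1).reverse
      = PySem.List.pyRange (((colAt cols c).length : Int) - 1) (-1) (-1) := by
    rw [PySem.List.pyRange_neg_one_eq_reverse]
    norm_num
  rw [newcolOf, PySem.List.enumerate_eq_map_pyRange (colAt cols c) ' ', PySem.List.len_eq,
    List.filter_map, ← List.map_reverse, ← List.map_reverse, ← List.filter_reverse, hrev,
    List.map_map, List.map_map]
  have hfilt := List.filter_congr
    (l := PySem.List.pyRange (((colAt cols c).length : Int) - 1) (-1) (-1))
    (p := (fun (x : Option Char) => decide (x ≠ none)) ∘ fun h =>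
      if PySem.Set.contains (scanB n cols) (c, h) = true then none
      else some ((colAt cols c).getD h.toNat ' '))
    (q := (fun (hc : Int × Char) => ! PySem.Set.contains (scanB n cols) (c, hc.1)) ∘ fun j =>
      (j, PySem.List.pyGetD (colAt cols c) j ' '))
    (by
      intro h _
      simp)
  rw [hfilt]
  apply List.map_congr_left
  intro h hh
  rw [List.mem_filter] at hh
  obtain ⟨hrng, hpred⟩ := hh
  rw [PySem.List.mem_pyRange_neg_one] at hrng
  simp only [Function.comp_apply, Bool.not_eq_true'] at hpred ⊢
  rw [if_neg (by rw [hpred]; exact Bool.false_ne_true), pyGetD_nn _ _ (by omega : (0:Int) ≤ h)]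

lemma specF_eq_hCell {g' : Grid} {m c r : Int} {col : List Char}
    (hs : surv (colList g' m c) = (col.reverse).map some)
    (hrm : r < m) :
    specF g' m r c = hCell m col r := by
  rw [specF, hs, hCell]
  have hll : (((col.reverse).map some).length : Int) = (col.length : Int) := by
    rw [List.length_map, List.length_reverse]
  by_cases hcase : r < m - (col.length : Int)
  · rw [if_pos (by omega), if_neg (by omega)]
  · rw [if_neg (by omega), if_pos (by omega)]
    have hk0 : (0 : Int) ≤ r - (m - (((col.reverse).map some).length : Int)) := by omega
    have hkl : r - (m - (((col.reverse).map some).length : Int)) < (((col.reverse).map some).length : Int) := by omega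
    rw [PySem.List.pyGetD_eq_getElem _ none hk0 hkl, List.getElem_map, List.getElem_reverse,
      getD_eq_getElem' _ _ (show (m - 1 - r).toNat < col.length by omega)]
    simp only [List.length_map, List.length_reverse] at hk0 hkl ⊢
    have hidx : col.length - 1 - (r - (m - (col.length : Int))).toNat = (m - 1 - r).toNat := by
      omega
    simp only [hidx]

-- one round of A from a related state reaches the state B reaches
lemma round_Inv {m n : Int} {g : Grid} {cols : List (List Char)} (hInv : ColInv m n g cols)
    (hm2 : 2 ≤ m) (hn2 : 2 ≤ n) :
    ColInv m n (fallingBlock m n (destroyBlock (findBlock m n g) g).2)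
      (removeMarked (scanB n cols) cols) := by
  obtain ⟨hShp, hlen, hcol⟩ := hInv
  have hshE : sameShape (destroyBlock (findBlock m n g) g).2 g := (destroyBlock_spec m n g).1.1
  have hShpE : Shp m n (destroyBlock (findBlock m n g) g).2 := Shp_of_sameShape hshE hShp
  have hShpN : Shp m n (fallingBlock m n (destroyBlock (findBlock m n g) g).2) :=
    Shp_of_sameShape (fall_sameShape _ hShpE) hShpE
  refine ⟨hShpN, ?_, ?_⟩
  · rw [removeMarked, List.length_map, PySem.List.length_enumerate, hlen]
  · intro c hc0 hcn
    have hclt : c.toNat < cols.length := by omega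
    rw [removeMarked_getD _ _ hc0 hclt]
    have hsurv := surv_erase_eq ⟨hShp, hlen, hcol⟩ hc0 hcn (by omega)
    refine ⟨le_trans (newcol_len _ _ _) (hcol c hc0 hcn).1, ?_⟩
    intro r hr0 hrm
    have hfall := (fallA_cols hShpE (n - 1) (by omega)
      (destroyBlock (findBlock m n g) g).2 (sameShape_refl _)
      (fun _ _ _ _ _ => rfl)).2 r c hr0 hc0
    rw [← fallingBlock_eq] at hfall
    rw [hfall, if_pos ⟨by omega, hrm⟩]
    rw [destroyed_grids_eq]
    exact specF_eq_hCell hsurv hrm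

lemma loops_eq (m n : Int) (fuel : Nat) (ans : Int) {g : Grid} {cols : List (List Char)}
    (hInv : ColInv m n g cols) :
    solLoopA m n fuel ans g = solLoopB n fuel ans cols := by
  induction fuel generalizing ans g cols with
  | zero => rfl
  | succ f ih =>
    simp only [solLoopA, solLoopB]
    by_cases hp : findBlock m n g = []
    · rw [if_pos hp, if_pos ((scan_nil_iff hInv).mp hp), hp]
      simp [destroyBlock]
    · have hT : scanB n cols ≠ [] := fun hc => hp ((scan_nil_iff hInv).mpr hc)
      rw [if_neg hp, if_neg hT]
      have hmn : 2 ≤ m ∧ 2 ≤ n := by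
        rcases hq : cov m n g with _ | ⟨p, t⟩
        · exact absurd ((find_nil_iff m n g).mpr hq) hp
        · have hpmem : p ∈ cov m n g := by rw [hq]; exact List.mem_cons_self
          rw [mem_cov] at hpmem
          obtain ⟨i, j, hi0, him, hj0, hjn, _, _⟩ := hpmem
          exact ⟨by omega, by omega⟩
      rw [(destroyBlock_spec m n g).2, scan_len hInv]
      exact ih _ (round_Inv hInv hmn.1 hmn.2)

lemma init_cell {m n : Int} {board : List String} (h1 : m ≤ (board.length : Int))
    (h2 : ∀ s ∈ board.take m.toNat, n ≤ (s.toList.length : Int))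
    {r c : Int} (hr0 : 0 ≤ r) (hrm : r < m) (hc0 : 0 ≤ c) (hcn : c < n) :
    cellGet (toGrid board) r c = some (bChar board r c) := by
  have hrb : r.toNat < board.length := by omega
  have hcb : c.toNat < (board[r.toNat].toList).length := by
    have hmem : board[r.toNat] ∈ board.take m.toNat := by
      have e : (board.take m.toNat)[r.toNat]'(by rw [List.length_take]; omega) = board[r.toNat] :=
        List.getElem_take
      rw [← e]
      exact List.getElem_mem _
    have := h2 _ hmem
    omega
  rw [cellGet_nn _ hr0 hc0]
  have hrow : (toGrid board).getD r.toNat [] = board[r.toNat].toList.map some := by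
    rw [List.getD_eq_getElem?_getD, toGrid, List.getElem?_map, List.getElem?_eq_getElem hrb]
    rfl
  rw [getN, hrow, List.getD_eq_getElem?_getD, List.getElem?_map, List.getElem?_eq_getElem hcb]
  simp only [Option.map_some, Option.getD_some]
  rw [bChar, pyGetD_nn _ _ hr0, pyGetD_nn _ _ hc0, getD_eq_getElem' _ _ hrb,
    getD_eq_getElem' _ _ hcb]

lemma init_Inv {m n : Int} {board : List String} (h1 : m ≤ (board.length : Int))
    (h2 : ∀ s ∈ board.take m.toNat, n ≤ (s.toList.length : Int)) :
    ColInv m n (toGrid board) (toCols m n board) := by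
  have hShp : Shp m n (toGrid board) := by
    constructor
    · rw [toGrid, List.length_map]; omega
    · intro r hr
      have hrb : r < board.length := by omega
      have hrow : (toGrid board).getD r [] = (board[r].toList.map some) := by
        rw [List.getD_eq_getElem?_getD, toGrid, List.getElem?_map, List.getElem?_eq_getElem hrb]
        rfl
      rw [hrow, List.length_map]
      have hmem : board[r] ∈ board.take m.toNat := by
        have e : (board.take m.toNat)[r]'(by rw [List.length_take]; omega) = board[r] :=
          List.getElem_take
        rw [← e]
        exact List.getElem_mem _
      have := h2 _ hmem
      omega
  refine ⟨hShp, ?_, ?_⟩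
  · rw [toCols, List.length_map, PySem.List.length_pyRange_one]
    omega
  · intro c hc0 hcn
    have hcolAt : colAt (toCols m n board) c
        = (PySem.List.pyRange (m - 1) (-1) (-1)).map (fun i => bChar board i c) := by
      rw [colAt, toCols,
        getD_eq_getElem' _ _ (by rw [List.length_map, PySem.List.length_pyRange_one]; omega),
        List.getElem_map, PySem.List.getElem_pyRange_one,
        show ((0 : Int) + (c.toNat : Int)) = c from by omega]
    have hclen : (colAt (toCols m n board) c).length = m.toNat := by
      rw [hcolAt, List.length_map, PySem.List.length_pyRange_neg_one]
      omega
    have hrevm : PySem.List.pyRange (m - 1) (-1) (-1) = (PySem.List.pyRange 0 m 1).reverse := by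
      rw [PySem.List.pyRange_neg_one_eq_reverse]
      norm_num
    refine ⟨by omega, ?_⟩
    intro r hr0 hrm
    have hidx : (m - 1 - r).toNat
        < (((PySem.List.pyRange 0 m 1).reverse).map (fun i => bChar board i c)).length := by
      rw [List.length_map, List.length_reverse, PySem.List.length_pyRange_one]
      omega
    rw [init_cell h1 h2 hr0 hrm hc0 hcn, hCell, hclen,
      if_pos (show m - 1 - r < ((m.toNat : Nat) : Int) by omega), hcolAt, hrevm,
      getD_eq_getElem' _ _ hidx, List.getElem_map, List.getElem_reverse,
      PySem.List.getElem_pyRange_one]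
    congr 1
    simp only [PySem.List.length_pyRange_one]
    rw [show (0 : Int) + ((((m - 0).toNat - 1 - (m - 1 - r).toNat : Nat)) : Int) = r from by omega]

lemma loopB_degenerate (m n : Int) (fuel : Nat) (ans : Int) (board : List String)
    (hd : m ≤ 0 ∨ n ≤ 0) :
    solLoopB n (fuel + 1) ans (toCols m n board) = ans := by
  have hscan : scanB n (toCols m n board) = [] := by
    rw [scanB_eq]
    rcases hd with hd | hd
    · have hcols : ∀ (j : Int), PySem.List.pyGetD (toCols m n board) j [] = [] := by
        intro j
        have : toCols m n board = (PySem.List.pyRange 0 n 1).map (fun _ => []) := by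
          rw [toCols, PySem.List.pyRange_neg_one_eq_nil (by omega)]
          rfl
        rw [this, PySem.List.pyGetD]
        rcases hg : PySem.List.pyGet? ((PySem.List.pyRange 0 n 1).map (fun _ => ([] : List Char))) j with _ | x
        · rfl
        · have := PySem.List.mem_of_pyGet?_eq_some _ hg
          rw [List.mem_map] at this
          obtain ⟨_, _, rfl⟩ := this
          rfl
      have hstep : ∀ (s : PySem.Set (Int × Int)) (j : Int), j ∈ PySem.List.pyRange 0 (n - 1) 1 →
          (PySem.List.pyRange 0 (((PySem.List.pyGetD (toCols m n board) j []).length : Int) - 1) 1).foldl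
            (scanStep (toCols m n board) j) s = s := by
        intro s j _
        rw [hcols j, show ((([] : List Char).length : Int) - 1) = -1 from by simp,
          PySem.List.pyRange_one_eq_nil (by omega : (-1 : Int) ≤ 0)]
        rfl
      rw [PySem.List.foldl_congr_mem _ _ (fun s _ => s) _ hstep, List.foldl_fixed]
      rfl
    · rw [PySem.List.pyRange_one_eq_nil (by omega)]
      rfl
  simp only [solLoopB, hscan]
  simp

-- ===== VERDICT (by name: the statement is the Claim_ definition above) =====
theorem solution_spec : Claim_equal_solution := by
  unfold Claim_equal_solution
  intro m n board _ hpre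
  unfold Spec_solution solution solution_alt
  rcases hpre with hm | hn | ⟨h1, h2⟩
  · rw [loopA_degenerate _ _ _ (Or.inl (by omega)), loopB_degenerate _ _ _ _ _ (Or.inl (by omega))]
  · rw [loopA_degenerate _ _ _ (Or.inr (by omega)), loopB_degenerate _ _ _ _ _ (Or.inr (by omega))]
  · exact loops_eq _ _ _ _ (init_Inv h1 h2)
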